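-- pv_equiv track=rewrite | github.com/fireharp/mumbli | benchmarks/bench.py | _stitch_transcripts
-- ===== SOURCE A (Python) =====
-- def _stitch_transcripts(texts: list[str]) -> str:
--     """Stitch overlapping chunk transcriptions using word-level overlap detection."""
--     if not texts:
--         return ""
--     result = texts[0]
--     for i in range(1, len(texts)):
--         prev_words = result.split()
--         next_words = texts[i].split()
--         if not prev_words or not next_words:
--             result = (result + " " + texts[i]).strip()
--             continue
--
--         # Look for longest common run between tail of prev and head of next
--         search_window = min(15, len(prev_words), len(next_words))
--         best_len = 0
--         best_prev_start = len(prev_words)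
--
--         for p_start in range(len(prev_words) - search_window, len(prev_words)):
--             for n_start in range(search_window):
--                 run = 0
--                 while (p_start + run < len(prev_words)
--                        and n_start + run < len(next_words)
--                        and prev_words[p_start + run].lower().strip(".,!?;:") ==
--                            next_words[n_start + run].lower().strip(".,!?;:")):
--                     run += 1
--                 if run >= 2 and run > best_len:
--                     best_len = run
--                     best_prev_start = p_start
--
--         if best_len >= 2:
--             # Merge: keep prev up to overlap, skip overlap in next
--             merged_prev = " ".join(prev_words[:best_prev_start + best_len])
--             # Find where in next_words the overlap ends
--             for n_start in range(search_window):
--                 run = 0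
--                 while (best_prev_start + run < len(prev_words)
--                        and n_start + run < len(next_words)
--                        and prev_words[best_prev_start + run].lower().strip(".,!?;:") ==
--                            next_words[n_start + run].lower().strip(".,!?;:")):
--                     run += 1
--                 if run == best_len:
--                     remaining = next_words[n_start + best_len:]
--                     result = merged_prev + (" " + " ".join(remaining) if remaining else "")
--                     break
--             else:
--                 result = result + " " + texts[i]
--         else:
--             # No overlap found, concatenate
--             result = result + " " + texts[i]
--
--     return result.strip()
-- ===== SOURCE B (Python) =====
-- # B: dynamic-programming suffix-run table (filled right-to-left) replaces A's nested
-- # while-loop run extension and its second re-scan pass; the stitched word/canonical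
-- # lists are maintained incrementally instead of re-splitting the growing result.
--
-- def _canon(w):
--     return w.lower().strip(".,!?;:")
--
--
-- def _stitch_transcripts(texts: list[str]) -> str:
--     if not texts:
--         return ""
--     result = texts[0]
--     words = result.split()
--     canon = [_canon(w) for w in words]
--     for t in texts[1:]:
--         nwords = t.split()
--         if not words or not nwords:
--             result = (result + " " + t).strip()
--             words += nwords
--             canon += [_canon(w) for w in nwords]
--             continue
--         ncanon = [_canon(w) for w in nwords]
--         L, N = len(words), len(nwords)
--         W = min(15, L, N)
--         base = L - W
--         # run[p - base][n] = length of the common canonical streak starting at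
--         # words[p] / nwords[n]; DP filled bottom-up, no streak is re-extended.
--         run = [[0] * (N + 1) for _ in range(W + 1)]
--         for p in range(L - 1, base - 1, -1):
--             for n in range(N - 1, -1, -1):
--                 if canon[p] == ncanon[n]:
--                     run[p - base][n] = run[p - base + 1][n + 1] + 1
--         best_len, best_p = 0, L
--         for p in range(base, L):
--             m = max(run[p - base][:W])
--             if m > best_len:
--                 best_len, best_p = m, p
--         if best_len >= 2:
--             n0 = next(n for n in range(W) if run[best_p - base][n] == best_len)
--             words = words[:best_p + best_len] + nwords[n0 + best_len:]
--             canon = canon[:best_p + best_len] + ncanon[n0 + best_len:]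
--             result = " ".join(words)
--         else:
--             result = result + " " + t
--             words += nwords
--             canon += ncanon
--     return result.strip()
-- ===== Notes on version B (the rewrite author's own statement) =====
-- stated objective: alternative
-- what changed: B computes all overlap run lengths bottom-up in a dynamic-programming suffix-run table (each streak cell derived once from its diagonal successor) instead of A's nested while-loop extension per (p,n) pair plus a second re-scanning pass, and maintains the stitched word and canonical word lists incrementally instead of re-splitting and re-canonicalising the growing result string on every chunk.
import Mathlib
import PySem

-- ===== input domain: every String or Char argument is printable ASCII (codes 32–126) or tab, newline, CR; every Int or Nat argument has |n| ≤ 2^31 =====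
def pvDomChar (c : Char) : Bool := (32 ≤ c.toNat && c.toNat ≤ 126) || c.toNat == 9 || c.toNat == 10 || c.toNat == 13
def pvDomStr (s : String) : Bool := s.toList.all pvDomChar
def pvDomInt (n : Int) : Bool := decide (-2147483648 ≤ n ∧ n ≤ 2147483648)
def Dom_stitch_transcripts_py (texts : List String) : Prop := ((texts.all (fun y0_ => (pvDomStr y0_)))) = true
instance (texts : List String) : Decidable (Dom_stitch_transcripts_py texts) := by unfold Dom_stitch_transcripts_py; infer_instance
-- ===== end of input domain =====

-- B replaces A's nested while-loop overlap extension (and its second re-scan pass) by a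
-- suffix-run table filled bottom-up by dynamic programming, and maintains the stitched
-- word/canonical lists incrementally instead of re-splitting the growing result;
-- equivalence of the return value is proved on all inputs.

-- ===== PORT A =====
-- A's inline canonicalisation expression w.lower().strip(".,!?;:") (Source B's helper _canon)
def canonB (w : List Char) : List Char :=
  PySem.Chars.stripChars (PySem.Chars.lower w) ['.', ',', '!', '?', ';', ':']

-- the 'while' loop of A: number of successful iterations
def runA (pw nw : List (List Char)) (p n : Nat) : Nat :=
  if h : p < pw.length ∧ n < nw.length ∧
      canonB (pw.getD p []) = canonB (nw.getD n []) then
    runA pw nw (p + 1) (n + 1) + 1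
  else 0
termination_by pw.length - p
decreasing_by omega

-- one iteration of A's 'for i in range(1, len(texts))' loop (body acting on 'result')
def stitchAStep (result : List Char) (t : List Char) : List Char :=
  let pw := PySem.Chars.split₀ result
  let nw := PySem.Chars.split₀ t
  if pw = [] ∨ nw = [] then
    PySem.Chars.strip (result ++ ' ' :: t)
  else
    let L := pw.length
    let W := min 15 (min L nw.length)
    -- range(len(prev_words)-search_window, len(prev_words)) as Nats (W ≤ L, so no negatives)
    let best := (List.range' (L - W) W).foldl
      (fun st p => (List.range W).foldl
        (fun st n =>
          let r := runA pw nw p n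
          if 2 ≤ r ∧ st.1 < r then (r, p) else st) st)
      ((0 : Nat), L)
    if 2 ≤ best.1 then
      let merged := PySem.Chars.join [' '] (pw.take (best.2 + best.1))
      -- the second 'for … break / else' loop: first n with run == best_len, else concatenate
      match (List.range W).find? (fun n => runA pw nw best.2 n == best.1) with
      | some n0 =>
        let remaining := nw.drop (n0 + best.1)
        merged ++ (if remaining.isEmpty then [] else ' ' :: PySem.Chars.join [' '] remaining)
      | none => result ++ ' ' :: t
    else result ++ ' ' :: t

def stitch_transcripts_py (texts : List String) : String :=
  match texts with
  | [] => ""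
  | t0 :: rest =>
    String.mk (PySem.Chars.strip ((rest.map String.toList).foldl stitchAStep t0.toList))

-- ===== PORT B =====
-- one row of Source B's DP table: run[p-base][n] for n = 0..N (cells are written independently,
-- so the descending n loop is ported as a map over the indices; unwritten cells stay 0)
def mkRow (cp : List Char) (ncanon : List (List Char)) (nxt : List Nat) (N : Nat) : List Nat :=
  (List.range (N + 1)).map (fun n =>
    if n < N ∧ cp = ncanon.getD n [] then nxt.getD (n + 1) 0 + 1 else 0)

-- Source B's descending p loop: rows for p, p+1, …, L-1 (row for p computed from the row for
-- p+1; the all-zero replicate row is the table's untouched p = L row)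
def rowsFrom (canon ncanon : List (List Char)) (N L p : Nat) : List (List Nat) :=
  if _h : p < L then
    let tail := rowsFrom canon ncanon N L (p + 1)
    mkRow (canon.getD p []) ncanon (tail.headD (List.replicate (N + 1) 0)) N :: tail
  else []
termination_by L - p
decreasing_by omega

-- one iteration of Source B's loop; state = (result, words, canon).
-- Python's max(xs) over a nonempty Nat list is ported as foldl Nat.max 0 (exact here), and
-- next(…) as find? — its none branch (Python would raise StopIteration) is unreachable:
-- best_len is attained in the row it is searched in.
def stitchBStep (st : List Char × List (List Char) × List (List Char)) (t : List Char) :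
    List Char × List (List Char) × List (List Char) :=
  let result := st.1
  let words := st.2.1
  let canon := st.2.2
  let nwords := PySem.Chars.split₀ t
  if words = [] ∨ nwords = [] then
    (PySem.Chars.strip (result ++ ' ' :: t), words ++ nwords, canon ++ nwords.map canonB)
  else
    let ncanon := nwords.map canonB
    let L := words.length
    let N := nwords.length
    let W := min 15 (min L N)
    let base := L - W
    let rows := rowsFrom canon ncanon N L base
    let best := (List.range' base W).foldl
      (fun st p =>
        let m := ((rows.getD (p - base) []).take W).foldl Nat.max 0
        if st.1 < m then (m, p) else st) ((0 : Nat), L)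
    if 2 ≤ best.1 then
      match (List.range W).find? (fun n => (rows.getD (best.2 - base) []).getD n 0 == best.1) with
      | some n0 =>
        let words' := words.take (best.2 + best.1) ++ nwords.drop (n0 + best.1)
        (PySem.Chars.join [' '] words', words',
          canon.take (best.2 + best.1) ++ ncanon.drop (n0 + best.1))
      | none => (result, words, canon)
    else (result ++ ' ' :: t, words ++ nwords, canon ++ ncanon)

def stitch_transcripts_py_alt (texts : List String) : String :=
  match texts with
  | [] => ""
  | t0 :: rest =>
    let w0 := PySem.Chars.split₀ t0.toList
    String.mk (PySem.Chars.strip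
      (((rest.map String.toList).foldl stitchBStep (t0.toList, w0, w0.map canonB)).1))

-- ===== PRECONDITION & SPEC =====
def Spec_stitch_transcripts_py (texts : List String) (out : String) : Prop := out = stitch_transcripts_py_alt texts
instance (texts : List String) (out : String) : Decidable (Spec_stitch_transcripts_py texts out) := by unfold Spec_stitch_transcripts_py; infer_instance

-- ===== CLAIM (what is proved, stated in full; the proofs are below) =====
def Claim_equal_stitch_transcripts_py : Prop := ∀ (texts : List String), Dom_stitch_transcripts_py texts → Spec_stitch_transcripts_py texts (stitch_transcripts_py texts)

-- ===== LEMMAS AND PROOFS =====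

def notSp (c : Char) : Bool := !PySem.Chars.isspace c

theorem split_go_acc (s : List Char) : ∀ (cur : List Char) (acc : List (List Char)),
    PySem.Chars.split₀.go s cur acc = acc.reverse ++ PySem.Chars.split₀.go s cur [] := by
  induction s with
  | nil =>
    intro cur acc
    simp [PySem.Chars.split₀.go]
    split <;> simp
  | cons c rest ih =>
    intro cur acc
    simp only [PySem.Chars.split₀.go]
    split
    · split
      · rw [ih [] acc]
      · rw [ih [] (cur.reverse :: acc), ih [] [cur.reverse]]
        simp
    · rw [ih (c :: cur) acc]

theorem split_cons_space {c : Char} (h : PySem.Chars.isspace c = true) (s : List Char) :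
    PySem.Chars.split₀ (c :: s) = PySem.Chars.split₀ s := by
  simp [PySem.Chars.split₀, PySem.Chars.split₀.go, h]

theorem split_go_cur (s : List Char) : ∀ (cur : List Char), cur ≠ [] →
    PySem.Chars.split₀.go s cur []
      = (cur.reverse ++ s.takeWhile notSp) :: PySem.Chars.split₀ (s.dropWhile notSp) := by
  induction s with
  | nil =>
    intro cur hcur
    simp [PySem.Chars.split₀.go, PySem.Chars.split₀, List.isEmpty_iff, hcur]
  | cons c rest ih =>
    intro cur hcur
    simp only [PySem.Chars.split₀.go]
    by_cases hsp : PySem.Chars.isspace c = true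
    · simp only [hsp, if_true, List.isEmpty_iff, hcur, if_neg hcur]
      rw [split_go_acc rest [] [cur.reverse]]
      have h1 : List.takeWhile notSp (c :: rest) = [] := by
        simp [List.takeWhile_cons, notSp, hsp]
      have h2 : List.dropWhile notSp (c :: rest) = c :: rest := by
        simp [List.dropWhile_cons, notSp, hsp]
      rw [h1, h2, split_cons_space hsp]
      simp [PySem.Chars.split₀]
    · rw [if_neg hsp, ih (c :: cur) (by simp)]
      have h1 : List.takeWhile notSp (c :: rest) = c :: List.takeWhile notSp rest := by
        simp [List.takeWhile_cons, notSp, hsp]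
      have h2 : List.dropWhile notSp (c :: rest) = List.dropWhile notSp rest := by
        simp [List.dropWhile_cons, notSp, hsp]
      rw [h1, h2]
      simp

theorem split_cons_word {c : Char} (h : PySem.Chars.isspace c = false) (s : List Char) :
    PySem.Chars.split₀ (c :: s)
      = (c :: s.takeWhile notSp) :: PySem.Chars.split₀ (s.dropWhile notSp) := by
  show PySem.Chars.split₀.go (c :: s) [] [] = _
  simp only [PySem.Chars.split₀.go, h]
  rw [if_neg (by simp [h]), split_go_cur s [c] (by simp)]
  simp

theorem split_nil : PySem.Chars.split₀ [] = [] := rfl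

def goodWord (w : List Char) : Prop := w ≠ [] ∧ w.all notSp = true

theorem split_all_space {s : List Char} (h : s.all PySem.Chars.isspace = true) :
    PySem.Chars.split₀ s = [] := by
  induction s with
  | nil => rfl
  | cons c rest ih =>
    simp only [List.all_cons, Bool.and_eq_true] at h
    rw [split_cons_space h.1, ih h.2]

theorem split_good {s : List Char} : ∀ w ∈ PySem.Chars.split₀ s, goodWord w := by
  induction hn : s.length using Nat.strong_induction_on generalizing s with
  | _ n ih =>
    cases s with
    | nil => intro w hw; simp [PySem.Chars.split₀, PySem.Chars.split₀.go] at hw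
    | cons c rest =>
      by_cases hsp : PySem.Chars.isspace c = true
      · rw [split_cons_space hsp]
        exact fun w hw => ih rest.length (by subst hn; simp only [List.length_cons]; omega) rfl w hw
      · rw [split_cons_word (by simpa using hsp)]
        intro w hw
        rcases List.mem_cons.mp hw with h1 | h2
        · subst h1
          refine ⟨by simp, ?_⟩
          simp only [List.all_cons, Bool.and_eq_true]
          exact ⟨by simp [notSp, hsp], by
            have : ∀ x ∈ rest.takeWhile notSp, notSp x := fun x hx => List.mem_takeWhile_imp hx
            simpa [List.all_eq_true] using this⟩
        · exact ih (rest.dropWhile notSp).length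
            (by have := List.length_dropWhile_le notSp rest
                subst hn; simp only [List.length_cons]; omega) rfl w h2

theorem takeWhile_len_ne {rest : List Char} (hne : rest.dropWhile notSp ≠ []) :
    (rest.takeWhile notSp).length ≠ rest.length := by
  intro hlen
  have heq : rest.takeWhile notSp = rest := (List.takeWhile_prefix notSp).eq_of_length hlen
  have : rest.dropWhile notSp = [] := by
    rw [List.dropWhile_eq_nil_iff]
    intro x hx
    have hx' : x ∈ rest.takeWhile notSp := by rw [heq]; exact hx
    exact List.mem_takeWhile_imp hx'
  exact hne this

theorem split_append_space (x y : List Char) :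
    PySem.Chars.split₀ (x ++ ' ' :: y) = PySem.Chars.split₀ x ++ PySem.Chars.split₀ y := by
  have hsp : PySem.Chars.isspace ' ' = true := by decide
  induction hn : x.length using Nat.strong_induction_on generalizing x with
  | _ n ih =>
    cases x with
    | nil => simp [split_cons_space hsp, split_nil]
    | cons c rest =>
      by_cases hc : PySem.Chars.isspace c = true
      · rw [List.cons_append, split_cons_space hc, split_cons_space hc,
          ih rest.length (by subst hn; simp only [List.length_cons]; omega) rest rfl]
      · rw [List.cons_append, split_cons_word (by simpa using hc),
          split_cons_word (by simpa using hc)]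
        by_cases hall : ∀ a ∈ rest, notSp a
        · have ht : (rest ++ ' ' :: y).takeWhile notSp = rest := by
            rw [List.takeWhile_append]
            simp [List.takeWhile_eq_self_iff.mpr hall, List.takeWhile_cons, notSp, hsp,
              List.dropWhile_eq_nil_iff.mpr hall]
          have hd : (rest ++ ' ' :: y).dropWhile notSp = ' ' :: y := by
            rw [List.dropWhile_append]
            simp [List.dropWhile_eq_nil_iff.mpr hall, List.dropWhile_cons, notSp, hsp]
          rw [ht, hd, split_cons_space hsp,
            List.takeWhile_eq_self_iff.mpr hall, List.dropWhile_eq_nil_iff.mpr hall,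
            split_nil]
          simp
        · push_neg at hall
          have hne : rest.dropWhile notSp ≠ [] := by
            simp only [ne_eq, List.dropWhile_eq_nil_iff]
            push_neg
            obtain ⟨a, ha, hna⟩ := hall
            exact ⟨a, ha, by simpa using hna⟩
          have ht : (rest ++ ' ' :: y).takeWhile notSp = rest.takeWhile notSp := by
            rw [List.takeWhile_append]
            simp [List.isEmpty_iff, hne, takeWhile_len_ne hne]
          have hd : (rest ++ ' ' :: y).dropWhile notSp = rest.dropWhile notSp ++ ' ' :: y := by
            rw [List.dropWhile_append]
            simp [List.isEmpty_iff, hne]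
          rw [ht, hd, ih (rest.dropWhile notSp).length
            (by have := List.length_dropWhile_le notSp rest
                subst hn; simp only [List.length_cons]; omega) (rest.dropWhile notSp) rfl]
          simp

theorem split_append_trailing {t : List Char} (s : List Char)
    (h : t.all PySem.Chars.isspace = true) :
    PySem.Chars.split₀ (s ++ t) = PySem.Chars.split₀ s := by
  induction hn : s.length using Nat.strong_induction_on generalizing s with
  | _ n ih =>
    cases s with
    | nil => simpa using split_all_space h
    | cons c rest =>
      by_cases hc : PySem.Chars.isspace c = true
      · rw [List.cons_append, split_cons_space hc, split_cons_space hc,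
          ih rest.length (by subst hn; simp only [List.length_cons]; omega) rest rfl]
      · rw [List.cons_append, split_cons_word (by simpa using hc),
          split_cons_word (by simpa using hc)]
        have htw : t.takeWhile notSp = [] := by
          cases t with
          | nil => rfl
          | cons d td =>
            simp only [List.all_cons, Bool.and_eq_true] at h
            simp [List.takeWhile_cons, notSp, h.1]
        have hdw : t.dropWhile notSp = t := by
          cases t with
          | nil => rfl
          | cons d td =>
            simp only [List.all_cons, Bool.and_eq_true] at h
            simp [List.dropWhile_cons, notSp, h.1]
        by_cases hall : ∀ a ∈ rest, notSp a
        · have ht : (rest ++ t).takeWhile notSp = rest := by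
            rw [List.takeWhile_append]
            simp [List.takeWhile_eq_self_iff.mpr hall, List.dropWhile_eq_nil_iff.mpr hall, htw]
          have hd : (rest ++ t).dropWhile notSp = t := by
            rw [List.dropWhile_append]
            simp [List.dropWhile_eq_nil_iff.mpr hall, hdw]
          rw [ht, hd, split_all_space h, List.takeWhile_eq_self_iff.mpr hall,
            List.dropWhile_eq_nil_iff.mpr hall, split_nil]
        · push_neg at hall
          have hne : rest.dropWhile notSp ≠ [] := by
            simp only [ne_eq, List.dropWhile_eq_nil_iff]
            push_neg
            obtain ⟨a, ha, hna⟩ := hall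
            exact ⟨a, ha, by simpa using hna⟩
          have ht : (rest ++ t).takeWhile notSp = rest.takeWhile notSp := by
            rw [List.takeWhile_append]; simp [List.isEmpty_iff, hne, takeWhile_len_ne hne]
          have hd : (rest ++ t).dropWhile notSp = rest.dropWhile notSp ++ t := by
            rw [List.dropWhile_append]; simp [List.isEmpty_iff, hne]
          rw [ht, hd, ih (rest.dropWhile notSp).length
            (by have := List.length_dropWhile_le notSp rest
                subst hn; simp only [List.length_cons]; omega) (rest.dropWhile notSp) rfl]

theorem split_lstrip (s : List Char) :
    PySem.Chars.split₀ (PySem.Chars.lstrip s) = PySem.Chars.split₀ s := by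
  unfold PySem.Chars.lstrip
  induction s with
  | nil => rfl
  | cons c rest ih =>
    by_cases hc : PySem.Chars.isspace c = true
    · rw [List.dropWhile_cons_of_pos (by simpa using hc), ih, split_cons_space hc]
    · rw [List.dropWhile_cons_of_neg (by simpa using hc)]

theorem split_rstrip (s : List Char) :
    PySem.Chars.split₀ (PySem.Chars.rstrip s) = PySem.Chars.split₀ s := by
  unfold PySem.Chars.rstrip
  have hdecomp : s = (s.reverse.dropWhile PySem.Chars.isspace).reverse
      ++ (s.reverse.takeWhile PySem.Chars.isspace).reverse := by
    rw [← List.reverse_append, List.takeWhile_append_dropWhile, List.reverse_reverse]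
  have hall : ((s.reverse.takeWhile PySem.Chars.isspace).reverse).all PySem.Chars.isspace = true := by
    simp only [List.all_reverse]
    have : ∀ x ∈ s.reverse.takeWhile PySem.Chars.isspace, PySem.Chars.isspace x :=
      fun x hx => List.mem_takeWhile_imp hx
    simpa [List.all_eq_true] using this
  conv_rhs => rw [hdecomp]
  rw [split_append_trailing _ hall]

theorem split_strip (s : List Char) :
    PySem.Chars.split₀ (PySem.Chars.strip s) = PySem.Chars.split₀ s := by
  unfold PySem.Chars.strip
  rw [split_rstrip, split_lstrip]

theorem join_append {xs : List (List Char)} (h : xs ≠ []) (ys : List (List Char)) :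
    PySem.Chars.join [' '] (xs ++ ys)
      = PySem.Chars.join [' '] xs
        ++ (if ys.isEmpty then [] else ' ' :: PySem.Chars.join [' '] ys) := by
  unfold PySem.Chars.join
  induction xs with
  | nil => exact absurd rfl h
  | cons x xs ih =>
    cases xs with
    | nil =>
      cases ys with
      | nil => simp
      | cons y ys => simp [List.intercalate]
    | cons x2 xs2 =>
      have step : ∀ (zs : List (List Char)),
          [' '].intercalate (x :: x2 :: zs) = x ++ ' ' :: [' '].intercalate (x2 :: zs) := by
        intro zs; simp [List.intercalate]
      have ih' := ih (by simp)
      simp only [List.cons_append] at ih' ⊢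
      rw [step (xs2 ++ ys), ih']
      cases ys <;> simp [step xs2]

theorem split_singleton_good {w : List Char} (h : w ≠ []) (h2 : w.all notSp = true) :
    PySem.Chars.split₀ w = [w] := by
  cases w with
  | nil => exact absurd rfl h
  | cons c rest =>
    simp only [List.all_cons, Bool.and_eq_true] at h2
    have hc : PySem.Chars.isspace c = false := by
      have := h2.1; simp [notSp] at this; exact this
    rw [split_cons_word hc]
    have hall : ∀ a ∈ rest, notSp a := by
      intro a ha
      exact (List.all_eq_true.mp h2.2) a ha
    rw [List.takeWhile_eq_self_iff.mpr hall, List.dropWhile_eq_nil_iff.mpr hall, split_nil]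

theorem split_join {ws : List (List Char)} (h : ∀ w ∈ ws, goodWord w) :
    PySem.Chars.split₀ (PySem.Chars.join [' '] ws) = ws := by
  induction ws with
  | nil => rfl
  | cons w ws ih =>
    have hw := h w (by simp)
    cases ws with
    | nil =>
      show PySem.Chars.split₀ ([' '].intercalate [w]) = [w]
      have : [' '].intercalate [w] = w := by simp [List.intercalate]
      rw [this]
      exact split_singleton_good hw.1 hw.2
    | cons w2 ws2 =>
      have step : PySem.Chars.join [' '] (w :: w2 :: ws2)
          = w ++ ' ' :: PySem.Chars.join [' '] (w2 :: ws2) := by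
        unfold PySem.Chars.join; simp [List.intercalate]
      rw [step, split_append_space, split_singleton_good hw.1 hw.2,
        ih (fun x hx => h x (by simp [hx]))]
      rfl

-- ===== table lemmas (B's DP rows compute A's while-loop runs) =====

theorem rowsFrom_length (canon ncanon : List (List Char)) (N L : Nat) : ∀ p,
    (rowsFrom canon ncanon N L p).length = L - p := by
  intro p
  induction hk : L - p using Nat.strong_induction_on generalizing p with
  | _ k ih =>
    rw [rowsFrom]
    by_cases hp : p < L
    · rw [dif_pos hp]
      simp only [List.length_cons]
      rw [ih (L - (p + 1)) (by omega) (p + 1) rfl]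
      omega
    · rw [dif_neg hp]
      simp
      omega

theorem rowsFrom_row_len (canon ncanon : List (List Char)) (N L : Nat) : ∀ p,
    ∀ row ∈ rowsFrom canon ncanon N L p, row.length = N + 1 := by
  intro p
  induction hk : L - p using Nat.strong_induction_on generalizing p with
  | _ k ih =>
    rw [rowsFrom]
    by_cases hp : p < L
    · rw [dif_pos hp]
      intro row hrow
      rcases List.mem_cons.mp hrow with h | h
      · subst h; simp [mkRow]
      · exact ih (L - (p + 1)) (by omega) (p + 1) rfl row h
    · rw [dif_neg hp]
      intro row hrow
      simp at hrow

theorem rows_get (pw nw : List (List Char)) :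
    ∀ p i n, p + i < pw.length → n ≤ nw.length →
    ((rowsFrom (pw.map canonB) (nw.map canonB) nw.length pw.length p).getD i []).getD n 0
      = runA pw nw (p + i) n := by
  intro p
  induction hk : pw.length - p using Nat.strong_induction_on generalizing p with
  | _ k ih =>
    intro i n hpi hn
    have hp : p < pw.length := by omega
    rw [rowsFrom, dif_pos hp]
    cases i with
    | succ j =>
      rw [List.getD_cons_succ]
      have := ih (pw.length - (p + 1)) (by omega) (p + 1) rfl j n (by omega) hn
      rw [this]
      congr 1
      omega
    | zero =>
      rw [List.getD_cons_zero, mkRow]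
      have hcell : (((List.range (nw.length + 1)).map (fun n =>
          if n < nw.length ∧ (pw.map canonB).getD p [] = (nw.map canonB).getD n []
          then (((rowsFrom (pw.map canonB) (nw.map canonB) nw.length pw.length (p + 1)).headD
                  (List.replicate (nw.length + 1) 0)).getD (n + 1) 0) + 1
          else 0)).getD n 0)
          = (if n < nw.length ∧ (pw.map canonB).getD p [] = (nw.map canonB).getD n []
          then (((rowsFrom (pw.map canonB) (nw.map canonB) nw.length pw.length (p + 1)).headD
                  (List.replicate (nw.length + 1) 0)).getD (n + 1) 0) + 1
          else 0) := by
        rw [List.getD_eq_getElem _ _ (by simp; omega)]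
        simp
      rw [hcell]
      have hmp : (pw.map canonB).getD p [] = canonB (pw.getD p []) := by
        rw [List.getD_eq_getElem _ _ (by simpa using hp), List.getElem_map,
          List.getD_eq_getElem _ _ hp]
      by_cases hcn : n < nw.length
      · have hmn : (nw.map canonB).getD n [] = canonB (nw.getD n []) := by
          rw [List.getD_eq_getElem _ _ (by simpa using hcn), List.getElem_map,
            List.getD_eq_getElem _ _ hcn]
        by_cases heq : canonB (pw.getD p []) = canonB (nw.getD n [])
        · rw [if_pos ⟨hcn, by rw [hmp, hmn]; exact heq⟩]
          have hnxt : ((rowsFrom (pw.map canonB) (nw.map canonB) nw.length pw.length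
              (p + 1)).headD (List.replicate (nw.length + 1) 0)).getD (n + 1) 0
              = runA pw nw (p + 1) (n + 1) := by
            by_cases hpl : p + 1 < pw.length
            · have htl := rowsFrom_length (pw.map canonB) (nw.map canonB)
                nw.length pw.length (p + 1)
              have hne : rowsFrom (pw.map canonB) (nw.map canonB) nw.length pw.length
                  (p + 1) ≠ [] := by
                intro hnil
                rw [hnil] at htl
                simp at htl
                omega
              obtain ⟨r, rs, hcons⟩ := List.exists_cons_of_ne_nil hne
              have hIH := ih (pw.length - (p + 1)) (by omega) (p + 1) rfl 0 (n + 1)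
                (by omega) (by omega)
              rw [hcons, List.getD_cons_zero] at hIH
              rw [hcons, List.headD_cons]
              simpa using hIH
            · have hnil : rowsFrom (pw.map canonB) (nw.map canonB) nw.length pw.length
                  (p + 1) = [] := by rw [rowsFrom, dif_neg hpl]
              rw [hnil, List.headD_nil]
              have hz : (List.replicate (nw.length + 1) 0).getD (n + 1) 0 = 0 := by
                simp [List.getD, List.getElem?_replicate]
                split <;> rfl
              rw [hz, runA, dif_neg (by intro hcon; exact hpl hcon.1)]
          rw [hnxt]
          conv_rhs => rw [runA]
          rw [dif_pos ⟨hp, hcn, heq⟩]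
        · rw [if_neg (by intro hcon; exact heq (by rw [← hmp, ← hmn]; exact hcon.2))]
          conv_rhs => rw [runA]
          rw [dif_neg (by intro hcon; exact heq hcon.2.2)]
      · rw [if_neg (by intro hcon; exact hcn hcon.1)]
        conv_rhs => rw [runA]
        rw [dif_neg (by intro hcon; exact hcn hcon.2.1)]

theorem take_eq_map_getD (l : List Nat) (W : Nat) (h : W ≤ l.length) :
    l.take W = (List.range W).map (fun n => l.getD n 0) := by
  apply List.ext_getElem
  · simp; omega
  · intro i h1 h2
    simp only [List.getElem_take, List.getElem_map, List.getElem_range]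
    rw [List.getD_eq_getElem _ _ (by simp at h1; omega)]

-- ===== fold-shape lemmas (A's best tracking vs B's row-max tracking) =====

theorem foldl_max_init (l : List Nat) (a : Nat) :
    l.foldl Nat.max a = Nat.max a (l.foldl Nat.max 0) := by
  induction l generalizing a with
  | nil => simp
  | cons x t ih =>
    simp only [List.foldl_cons]
    rw [ih (Nat.max a x), ih (Nat.max 0 x)]
    simp [Nat.zero_max, Nat.max_assoc]

theorem mem_of_foldl_max {l : List Nat} (h : l.foldl Nat.max 0 ≠ 0) :
    l.foldl Nat.max 0 ∈ l := by
  rcases PySem.List.foldl_max_mem l 0 with h1 | h1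
  · exact absurd h1 h
  · exact h1

theorem inner_fold (g : Nat → Nat) (ns : List Nat) : ∀ (st : Nat × Nat) (p : Nat),
    ns.foldl (fun st n => let r := g n; if 2 ≤ r ∧ st.1 < r then (r, p) else st) st
      = (if 2 ≤ (ns.map g).foldl Nat.max 0 ∧ st.1 < (ns.map g).foldl Nat.max 0
          then ((ns.map g).foldl Nat.max 0, p) else st) := by
  induction ns with
  | nil => intro st p; simp
  | cons n t ih =>
    intro st p
    simp only [List.foldl_cons, List.map_cons]
    rw [foldl_max_init _ (Nat.max 0 (g n))]
    set K := (t.map g).foldl Nat.max 0 with hK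
    rw [ih]
    have hz : Nat.max 0 (g n) = g n := Nat.max_eq_right (Nat.zero_le _)
    rw [hz]
    rcases Nat.le_total (g n) K with hmax | hmax
    · simp only [Nat.max_eq_right hmax]
      split_ifs <;> first | rfl | (exfalso; omega) | (congr 1 <;> omega)
    · simp only [Nat.max_eq_left hmax]
      split_ifs <;> first | rfl | (exfalso; omega) | (congr 1 <;> omega) <;> omega

theorem outer_no (m : Nat → Nat) (ps : List Nat) : ∀ (st : Nat × Nat),
    ¬ (2 ≤ (ps.map m).foldl Nat.max 0 ∧ st.1 < (ps.map m).foldl Nat.max 0) →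
    ps.foldl (fun st p => if 2 ≤ m p ∧ st.1 < m p then (m p, p) else st) st = st := by
  induction ps with
  | nil => intro st _; rfl
  | cons q t ih =>
    intro st h
    simp only [List.map_cons, List.foldl_cons] at h ⊢
    rw [foldl_max_init _ (Nat.max 0 (m q))] at h
    have hz : Nat.max 0 (m q) = m q := Nat.max_eq_right (Nat.zero_le _)
    rw [hz] at h
    set K := (t.map m).foldl Nat.max 0 with hK
    have hq : ¬ (2 ≤ m q ∧ st.1 < m q) := by
      rcases Nat.le_total (m q) K with hmax | hmax
      · simp only [Nat.max_eq_right hmax] at h; omega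
      · simp only [Nat.max_eq_left hmax] at h; omega
    rw [if_neg hq]
    apply ih
    rcases Nat.le_total (m q) K with hmax | hmax
    · simp only [Nat.max_eq_right hmax] at h; omega
    · simp only [Nat.max_eq_left hmax] at h; omega

theorem outer_yes (m : Nat → Nat) (ps : List Nat) : ∀ (st : Nat × Nat),
    2 ≤ (ps.map m).foldl Nat.max 0 → st.1 < (ps.map m).foldl Nat.max 0 →
    ∃ pstar, ps.find? (fun p => m p == (ps.map m).foldl Nat.max 0) = some pstar ∧
      ps.foldl (fun st p => if 2 ≤ m p ∧ st.1 < m p then (m p, p) else st) st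
        = ((ps.map m).foldl Nat.max 0, pstar) := by
  induction ps with
  | nil => intro st h2 hlt; simp at h2
  | cons q t ih =>
    intro st h2 hlt
    simp only [List.map_cons, List.foldl_cons] at h2 hlt ⊢
    rw [foldl_max_init _ (Nat.max 0 (m q))] at h2 hlt ⊢
    have hz : Nat.max 0 (m q) = m q := Nat.max_eq_right (Nat.zero_le _)
    rw [hz] at h2 hlt ⊢
    set K := (t.map m).foldl Nat.max 0 with hK
    rcases Nat.lt_or_ge (m q) K with hmax | hmax
    · have hMK : Nat.max (m q) K = K := Nat.max_eq_right (Nat.le_of_lt hmax)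
      rw [hMK] at h2 hlt ⊢
      have hne : (m q == K) = false := by simp; omega
      rw [List.find?_cons_of_neg (by simp [hne])]
      by_cases hq : 2 ≤ m q ∧ st.1 < m q
      · rw [if_pos hq]
        exact ih ((m q, q)) h2 (by simpa using hmax)
      · rw [if_neg hq]
        exact ih st h2 hlt
    · have hMK : Nat.max (m q) K = m q := Nat.max_eq_left hmax
      rw [hMK] at h2 hlt ⊢
      have hq : 2 ≤ m q ∧ st.1 < m q := ⟨h2, hlt⟩
      rw [if_pos hq, List.find?_cons_of_pos (by simp)]
      refine ⟨q, rfl, ?_⟩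
      apply outer_no
      intro hcon
      simp only at hcon
      omega

theorem outerB_no (m : Nat → Nat) (ps : List Nat) : ∀ (st : Nat × Nat),
    ¬ (st.1 < (ps.map m).foldl Nat.max 0) →
    ps.foldl (fun st p => if st.1 < m p then (m p, p) else st) st = st := by
  induction ps with
  | nil => intro st _; rfl
  | cons q t ih =>
    intro st h
    simp only [List.map_cons, List.foldl_cons] at h ⊢
    rw [foldl_max_init _ (Nat.max 0 (m q))] at h
    have hz : Nat.max 0 (m q) = m q := Nat.max_eq_right (Nat.zero_le _)
    rw [hz] at h
    set K := (t.map m).foldl Nat.max 0 with hK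
    have hq : ¬ (st.1 < m q) := by
      rcases Nat.le_total (m q) K with hmax | hmax
      · simp only [Nat.max_eq_right hmax] at h; omega
      · simp only [Nat.max_eq_left hmax] at h; omega
    rw [if_neg hq]
    apply ih
    rcases Nat.le_total (m q) K with hmax | hmax
    · simp only [Nat.max_eq_right hmax] at h; omega
    · simp only [Nat.max_eq_left hmax] at h; omega

theorem outerB_yes (m : Nat → Nat) (ps : List Nat) : ∀ (st : Nat × Nat),
    st.1 < (ps.map m).foldl Nat.max 0 →
    ∃ pstar, ps.find? (fun p => m p == (ps.map m).foldl Nat.max 0) = some pstar ∧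
      ps.foldl (fun st p => if st.1 < m p then (m p, p) else st) st
        = ((ps.map m).foldl Nat.max 0, pstar) := by
  induction ps with
  | nil => intro st hlt; simp at hlt
  | cons q t ih =>
    intro st hlt
    simp only [List.map_cons, List.foldl_cons] at hlt ⊢
    rw [foldl_max_init _ (Nat.max 0 (m q))] at hlt ⊢
    have hz : Nat.max 0 (m q) = m q := Nat.max_eq_right (Nat.zero_le _)
    rw [hz] at hlt ⊢
    set K := (t.map m).foldl Nat.max 0 with hK
    rcases Nat.lt_or_ge (m q) K with hmax | hmax
    · have hMK : Nat.max (m q) K = K := Nat.max_eq_right (Nat.le_of_lt hmax)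
      rw [hMK] at hlt ⊢
      have hne : (m q == K) = false := by simp; omega
      rw [List.find?_cons_of_neg (by simp [hne])]
      by_cases hq : st.1 < m q
      · rw [if_pos hq]
        exact ih ((m q, q)) (by simpa using hmax)
      · rw [if_neg hq]
        exact ih st hlt
    · have hMK : Nat.max (m q) K = m q := Nat.max_eq_left hmax
      rw [hMK] at hlt ⊢
      rw [if_pos hlt, List.find?_cons_of_pos (by simp)]
      refine ⟨q, rfl, ?_⟩
      apply outerB_no
      intro hcon
      simp only at hcon
      omega

theorem find?_congr_mem {α : Type} (l : List α) (p q : α → Bool)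
    (h : ∀ x ∈ l, p x = q x) : l.find? p = l.find? q := by
  induction l with
  | nil => rfl
  | cons x t ih =>
    simp only [List.find?_cons]
    rw [h x (by simp)]
    cases q x with
    | true => rfl
    | false => exact ih (fun y hy => h y (by simp [hy]))

-- ===== the simulation =====

theorem step_sim (result t : List Char) (words : List (List Char)) (canon : List (List Char))
    (hw : words = PySem.Chars.split₀ result) (hc : canon = words.map canonB) :
    (stitchBStep (result, words, canon) t).1 = stitchAStep result t ∧
    (stitchBStep (result, words, canon) t).2.1
      = PySem.Chars.split₀ (stitchBStep (result, words, canon) t).1 ∧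
    (stitchBStep (result, words, canon) t).2.2
      = ((stitchBStep (result, words, canon) t).2.1).map canonB := by
  have hgoodw : ∀ w ∈ words, goodWord w := by rw [hw]; exact split_good
  have hgoodn : ∀ w ∈ PySem.Chars.split₀ t, goodWord w := split_good
  subst hc
  simp only [stitchAStep, stitchBStep, ← hw]
  set nw := PySem.Chars.split₀ t with hnw
  by_cases hbr : words = [] ∨ nw = []
  · rw [if_pos hbr, if_pos hbr]
    refine ⟨rfl, ?_, ?_⟩
    · show words ++ nw = PySem.Chars.split₀ (PySem.Chars.strip (result ++ ' ' :: t))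
      rw [split_strip, split_append_space, ← hw, ← hnw]
    · show words.map canonB ++ nw.map canonB = (words ++ nw).map canonB
      rw [List.map_append]
  · rw [if_neg hbr, if_neg hbr]
    push_neg at hbr
    obtain ⟨hwne, hnne⟩ := hbr
    set L := words.length with hL
    set N := nw.length with hN
    set W := min 15 (min L N) with hW
    have hW1 : 1 ≤ W := by
      have h1 : 0 < L := List.length_pos_iff.mpr hwne
      have h2 : 0 < N := List.length_pos_iff.mpr hnne
      omega
    have hWL : W ≤ L := by omega
    have hWN : W ≤ N := by omega
    set m : Nat → Nat :=
      fun p => ((List.range W).map (fun n => runA words nw p n)).foldl Nat.max 0 with hm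
    -- A's double fold in terms of m
    have hA : (List.range' (L - W) W).foldl
        (fun st p => (List.range W).foldl
          (fun st n =>
            let r := runA words nw p n
            if 2 ≤ r ∧ st.1 < r then (r, p) else st) st) ((0 : Nat), L)
        = (List.range' (L - W) W).foldl
            (fun st p => if 2 ≤ m p ∧ st.1 < m p then (m p, p) else st) ((0 : Nat), L) := by
      apply PySem.List.foldl_congr_mem
      intro st p _
      exact inner_fold (fun n => runA words nw p n) (List.range W) st p
    -- B's rows compute runA
    set rows := rowsFrom (words.map canonB) (nw.map canonB) N L (L - W) with hrows
    have hrlen : rows.length = W := by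
      rw [hrows, rowsFrom_length]; omega
    have hcell : ∀ p, L - W ≤ p → p < L → ∀ n, n ≤ N →
        (rows.getD (p - (L - W)) []).getD n 0 = runA words nw p n := by
      intro p hp1 hp2 n hn
      have := rows_get words nw (L - W) (p - (L - W)) n (by omega) (by omega)
      rw [hrows]
      rw [show L - W + (p - (L - W)) = p from by omega] at this
      exact this
    have hrowlen : ∀ p, L - W ≤ p → p < L → (rows.getD (p - (L - W)) []).length = N + 1 := by
      intro p hp1 hp2
      have hidx : p - (L - W) < rows.length := by omega
      rw [List.getD_eq_getElem _ _ hidx]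
      exact rowsFrom_row_len (words.map canonB) (nw.map canonB) N L (L - W) _
        (List.getElem_mem hidx)
    have hmB : ∀ p ∈ List.range' (L - W) W,
        ((rows.getD (p - (L - W)) []).take W).foldl Nat.max 0 = m p := by
      intro p hp
      have hpm := List.mem_range'_1.mp hp
      have hp1 : L - W ≤ p := hpm.1
      have hp2 : p < L := by have := hpm.2; omega
      rw [take_eq_map_getD _ _ (by rw [hrowlen p hp1 hp2]; omega)]
      rw [hm]
      congr 1
      apply List.map_congr_left
      intro n hnmem
      exact hcell p hp1 hp2 n (le_of_lt (lt_of_lt_of_le (List.mem_range.mp hnmem) hWN))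
    have hB : (List.range' (L - W) W).foldl
        (fun st p =>
          if st.1 < ((rows.getD (p - (L - W)) []).take W).foldl Nat.max 0
          then (((rows.getD (p - (L - W)) []).take W).foldl Nat.max 0, p) else st) ((0 : Nat), L)
        = (List.range' (L - W) W).foldl
            (fun st p => if st.1 < m p then (m p, p) else st) ((0 : Nat), L) := by
      apply PySem.List.foldl_congr_mem
      intro st p hp
      simp only [hmB p hp]
    rw [hA, hB]
    set M := ((List.range' (L - W) W).map m).foldl Nat.max 0 with hM
    by_cases hM2 : 2 ≤ M
    · obtain ⟨pstar, hfind, hfoldA⟩ :=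
        outer_yes m (List.range' (L - W) W) ((0 : Nat), L) hM2
          (Nat.lt_of_lt_of_le (by norm_num) hM2)
      obtain ⟨pstar', hfind', hfoldB⟩ :=
        outerB_yes m (List.range' (L - W) W) ((0 : Nat), L)
          (Nat.lt_of_lt_of_le (by norm_num) hM2)
      have hps : pstar' = pstar := by
        rw [hfind] at hfind'
        exact Option.some_inj.mp hfind'.symm
      rw [hps] at hfoldB
      rw [hfoldA, hfoldB]
      simp only
      have hpmem : pstar ∈ List.range' (L - W) W := List.mem_of_find?_eq_some hfind
      have hpm := List.mem_range'_1.mp hpmem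
      have hp1 : L - W ≤ pstar := hpm.1
      have hp2 : pstar < L := by have := hpm.2; omega
      have hmstar : m pstar = M := by
        have := List.find?_some hfind
        simpa using this
      -- the two n-searches are the same search
      have hfn : (List.range W).find? (fun n => (rows.getD (pstar - (L - W)) []).getD n 0 == M)
          = (List.range W).find? (fun n => runA words nw pstar n == M) := by
        apply find?_congr_mem
        intro n hnmem
        rw [hcell pstar hp1 hp2 n (le_of_lt (lt_of_lt_of_le (List.mem_range.mp hnmem) hWN))]
      -- the search succeeds
      have hmemn : M ∈ (List.range W).map (fun n => runA words nw pstar n) := by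
        rw [← hmstar]
        exact mem_of_foldl_max (by show m pstar ≠ 0; rw [hmstar]; omega)
      obtain ⟨n, hnmem, hval⟩ := List.mem_map.mp hmemn
      have hsome : ((List.range W).find? (fun n => runA words nw pstar n == M)).isSome := by
        rw [List.find?_isSome]
        exact ⟨n, hnmem, by simp [hval]⟩
      obtain ⟨n0, hn0⟩ := Option.isSome_iff_exists.mp hsome
      rw [if_pos hM2, if_pos hM2, hfn, hn0]
      have htake_ne : words.take (pstar + M) ≠ [] := by
        intro hnil
        have := congrArg List.length hnil
        simp only [List.length_take, List.length_nil] at this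
        have h0 : 0 < L := List.length_pos_iff.mpr hwne
        simp only [← hL] at this
        omega
      refine ⟨?_, ?_, ?_⟩
      · show PySem.Chars.join [' '] (words.take (pstar + M) ++ nw.drop (n0 + M)) = _
        rw [join_append htake_ne]
      · show words.take (pstar + M) ++ nw.drop (n0 + M)
          = PySem.Chars.split₀ (PySem.Chars.join [' '] (words.take (pstar + M) ++ nw.drop (n0 + M)))
        rw [split_join]
        intro w hwmem
        rcases List.mem_append.mp hwmem with h | h
        · exact hgoodw w (List.mem_of_mem_take h)
        · exact hgoodn w (List.mem_of_mem_drop h)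
      · show (words.map canonB).take (pstar + M) ++ (nw.map canonB).drop (n0 + M)
          = (words.take (pstar + M) ++ nw.drop (n0 + M)).map canonB
        rw [List.map_append, List.map_take, List.map_drop]
    · -- no usable overlap: both take the concatenation branch
      have hfoldA := outer_no m (List.range' (L - W) W) ((0 : Nat), L)
        (by intro hcon; exact hM2 hcon.1)
      have hBlt : ((List.range' (L - W) W).foldl
          (fun st p => if st.1 < m p then (m p, p) else st) ((0 : Nat), L)).1 < 2 := by
        by_cases hM0 : M = 0
        · rw [outerB_no m _ _ (by simp only [← hM, hM0]; omega)]
          norm_num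
        · obtain ⟨ps', _, hfb⟩ := outerB_yes m (List.range' (L - W) W) ((0 : Nat), L)
            (by simp only [← hM]; omega)
          rw [hfb]
          simp only [← hM] at *
          omega
      rw [hfoldA]
      rw [if_neg (by norm_num : ¬ ((2:Nat) ≤ 0)), if_neg (by omega)]
      refine ⟨rfl, ?_, ?_⟩
      · show words ++ nw = PySem.Chars.split₀ (result ++ ' ' :: t)
        rw [split_append_space, ← hw, ← hnw]
      · show words.map canonB ++ nw.map canonB = (words ++ nw).map canonB
        rw [List.map_append]

theorem fold_sim (rest : List (List Char)) :
    ∀ (result : List Char) (words canon : List (List Char)),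
    words = PySem.Chars.split₀ result → canon = words.map canonB →
    (rest.foldl stitchBStep (result, words, canon)).1 = rest.foldl stitchAStep result := by
  induction rest with
  | nil => intro result words canon hw hc; rfl
  | cons t rest ih =>
    intro result words canon hw hc
    obtain ⟨h1, h2, h3⟩ := step_sim result t words canon hw hc
    simp only [List.foldl_cons]
    have hrec := ih (stitchBStep (result, words, canon) t).1
      (stitchBStep (result, words, canon) t).2.1
      (stitchBStep (result, words, canon) t).2.2 h2 h3
    rw [← h1]
    simpa using hrec

-- ===== VERDICT (by name: the statement is the Claim_ definition above) =====
theorem stitch_transcripts_py_spec : Claim_equal_stitch_transcripts_py := by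
  intro texts _
  unfold Spec_stitch_transcripts_py
  cases texts with
  | nil => rfl
  | cons t0 rest =>
    simp only [stitch_transcripts_py, stitch_transcripts_py_alt]
    rw [fold_sim (rest.map String.toList) t0.toList _ _ rfl rfl]
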